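-- pv_equiv track=rewrite | github.com/viktorherczku/HaziFeladat | Prog1Hazi2.py | feladat_1
-- ===== SOURCE A (Python) =====
-- def feladat_1(szam):
--     db=0
--     for i in range(1,szam+1):
--         if szam%i==0:
--             db+=1
--     if db==4:
--         return True
--     return False
-- ===== SOURCE B (Python) =====
-- def feladat_1(szam):
--     db = 0
--     i = 1
--     while i * i <= szam:
--         if szam % i == 0:
--             db += 1 if i * i == szam else 2
--         i += 1
--     return db == 4
-- ===== Notes on version B (the rewrite author's own statement) =====
-- stated objective: faster
-- what changed: Instead of scanning every candidate up to n, B counts divisor pairs up to the square root of n, adding a pair per divisor strictly below the root and a single count for an exact square root.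
import Mathlib
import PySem

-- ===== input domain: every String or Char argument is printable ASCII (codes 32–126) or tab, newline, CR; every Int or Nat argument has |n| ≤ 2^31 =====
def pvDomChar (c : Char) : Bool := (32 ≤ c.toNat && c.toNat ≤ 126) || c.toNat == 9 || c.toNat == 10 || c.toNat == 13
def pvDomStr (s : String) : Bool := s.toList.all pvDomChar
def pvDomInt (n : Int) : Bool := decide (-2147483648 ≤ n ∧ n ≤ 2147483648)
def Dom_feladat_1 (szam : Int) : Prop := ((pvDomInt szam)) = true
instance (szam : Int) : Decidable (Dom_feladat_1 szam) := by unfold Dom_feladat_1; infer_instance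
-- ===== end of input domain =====

-- B counts divisor pairs up to the square root instead of A's scan of every candidate up to the number itself.

-- ===== PORT A =====
def feladat_1 (szam : Int) : Bool :=
  let db : Int :=
    (PySem.List.pyRange 1 (szam + 1) 1).foldl
      (fun db i => if PySem.Int.mod szam i == 0 then db + 1 else db) 0
  if db = 4 then true else false

-- ===== PORT B =====
-- the `while i * i <= szam` loop of Source B; the counter stays positive, kept as a Nat for termination
def feladat_1_altLoop (szam : Int) (i : Nat) (db : Int) : Int :=
  if h : (i : Int) * (i : Int) ≤ szam then
    feladat_1_altLoop szam (i + 1)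
      (if PySem.Int.mod szam (i : Int) == 0 then
         db + (if (i : Int) * (i : Int) == szam then 1 else 2)
       else db)
  else db
termination_by szam.toNat + 1 - i
decreasing_by
  rcases Nat.eq_zero_or_pos i with h0 | h0
  · subst h0; omega
  · have h1 : (1 : Int) ≤ (i : Int) := by exact_mod_cast h0
    have : (i : Int) ≤ (i : Int) * (i : Int) := le_mul_of_one_le_left (by omega) h1
    have : (i : Int) ≤ szam := le_trans this h
    omega

def feladat_1_alt (szam : Int) : Bool :=
  feladat_1_altLoop szam 1 0 == 4

-- ===== PRECONDITION & SPEC =====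
def Spec_feladat_1 (szam : Int) (out : Bool) : Prop := out = feladat_1_alt szam
instance (szam : Int) (out : Bool) : Decidable (Spec_feladat_1 szam out) := by unfold Spec_feladat_1; infer_instance

-- ===== CLAIM (what is proved, stated in full; the proofs are below) =====
def Claim_equal_feladat_1 : Prop := ∀ (szam : Int), Dom_feladat_1 szam → Spec_feladat_1 szam (feladat_1 szam)

-- ===== LEMMAS AND PROOFS =====

-- divisors of N in [1, N], those at most / at least its square root, and the weight B adds
def pvDivs (N : Nat) : Finset Nat := (Finset.Icc 1 N).filter (fun d => d ∣ N)
def pvSmall (N : Nat) : Finset Nat := (pvDivs N).filter (fun d => d * d ≤ N)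
def pvLarge (N : Nat) : Finset Nat := (pvDivs N).filter (fun d => N ≤ d * d)
def pvW (N d : Nat) : Int := if d * d = N then 1 else 2

lemma cardCount (N : Nat) (p : Nat → Prop) [DecidablePred p] :
    ((Finset.range N).filter p).card = (List.range N).countP (fun k => decide (p k)) := by
  induction N with
  | zero => simp
  | succ n ih =>
    rw [Finset.range_add_one, List.range_succ, Finset.filter_insert, List.countP_append]
    by_cases h : p n <;> simp [h, ih, Finset.card_insert_of_notMem]

lemma pvA_count (szam : Int) (hpos : 1 ≤ szam) :
    (PySem.List.pyRange 1 (szam + 1) 1).foldl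
      (fun db i => if PySem.Int.mod szam i == 0 then db + 1 else db) 0
    = ((pvDivs szam.toNat).card : Int) := by
  rw [PySem.List.foldl_if_add_one]
  rw [PySem.List.pyRange_one, List.countP_map]
  have hN : (szam + 1 - 1).toNat = szam.toNat := by omega
  rw [hN]
  set N := szam.toNat with hNdef
  have hsz : szam = (N : Int) := by omega
  simp only [Function.comp_def]
  have hc : ((List.range N).countP (fun (k : Nat) => PySem.Int.mod szam (1 + (k:Int)) == 0))
      = (List.range N).countP (fun k => decide ((k+1) ∣ N)) := by
    apply List.countP_congr
    intro k _
    simp only [beq_iff_eq, decide_eq_true_eq, PySem.Int.mod_eq_zero_iff_dvd, hsz]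
    rw [show (1 + (k:Int)) = ((k+1 : Nat) : Int) by push_cast; ring]
    exact ⟨fun h => by exact_mod_cast h, fun h => by exact_mod_cast h⟩
  rw [hc, ← cardCount]
  have himg : Finset.Icc 1 N = Finset.image (· + 1) (Finset.range N) := by
    ext x; simp [Finset.mem_Icc]; constructor
    · rintro ⟨h1, h2⟩; exact ⟨x - 1, by omega, by omega⟩
    · rintro ⟨a, h1, rfl⟩; omega
  have : pvDivs N = Finset.image (· + 1) ((Finset.range N).filter (fun k => (k+1) ∣ N)) := by
    rw [pvDivs, himg, Finset.filter_image]
  rw [this, Finset.card_image_of_injective _ (by intro a b h; simpa using h)]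
  simp

lemma pvS_step (N : Nat) (i : Nat) :
    ∑ d ∈ (pvSmall N).filter (fun d => i ≤ d), pvW N d
      = (if i ∈ pvSmall N then pvW N i else 0)
        + ∑ d ∈ (pvSmall N).filter (fun d => i + 1 ≤ d), pvW N d := by
  by_cases hi : i ∈ pvSmall N
  · have hset : (pvSmall N).filter (fun d => i ≤ d)
        = insert i ((pvSmall N).filter (fun d => i + 1 ≤ d)) := by
      ext d
      simp only [Finset.mem_filter, Finset.mem_insert]
      constructor
      · rintro ⟨hd, hle⟩
        rcases Nat.eq_or_lt_of_le hle with h | h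
        · left; omega
        · right; exact ⟨hd, h⟩
      · rintro (rfl | ⟨hd, h⟩)
        · exact ⟨hi, le_refl _⟩
        · exact ⟨hd, by omega⟩
    rw [hset, Finset.sum_insert (by simp), if_pos hi]
  · have hset : (pvSmall N).filter (fun d => i ≤ d)
        = (pvSmall N).filter (fun d => i + 1 ≤ d) := by
      ext d
      simp only [Finset.mem_filter]
      constructor
      · rintro ⟨hd, hle⟩
        refine ⟨hd, ?_⟩
        rcases Nat.eq_or_lt_of_le hle with h | h
        · exact absurd (h ▸ hd) hi
        · omega
      · rintro ⟨hd, h⟩; exact ⟨hd, by omega⟩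
    rw [hset, if_neg hi, zero_add]

lemma pvB_loop (szam : Int) (hpos : 1 ≤ szam) (i : Nat) (db : Int) :
    feladat_1_altLoop szam i db
      = db + ∑ d ∈ (pvSmall szam.toNat).filter (fun d => i ≤ d), pvW szam.toNat d := by
  set N := szam.toNat with hNdef
  have hsz : szam = (N : Int) := by omega
  have hN : 1 ≤ N := by omega
  fun_induction feladat_1_altLoop szam i db with
  | case1 i db h ih =>
    simp only [dite_eq_ite] at ih
    rw [ih, pvS_step N i]
    by_cases hmem : i ∈ pvSmall N
    · have hi1 : 1 ≤ i := by
        simp only [pvSmall, pvDivs, Finset.mem_filter, Finset.mem_Icc] at hmem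
        omega
      have hdvd : (i : Int) ∣ szam := by
        simp only [pvSmall, pvDivs, Finset.mem_filter, Finset.mem_Icc] at hmem
        rw [hsz]; exact_mod_cast hmem.1.2
      rw [if_pos (by simpa [beq_iff_eq, PySem.Int.mod_eq_zero_iff_dvd] using hdvd)]
      have hw : (if (i : Int) * (i : Int) == szam then (1:Int) else 2) = pvW N i := by
        simp only [beq_iff_eq, hsz, pvW]
        norm_cast
      rw [hw, if_pos hmem]; ring
    · have hnd : ¬ (PySem.Int.mod szam (i : Int) == 0) = true := by
        simp only [beq_iff_eq, PySem.Int.mod_eq_zero_iff_dvd]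
        intro hdvd
        rcases Nat.eq_zero_or_pos i with h0 | h0
        · subst h0; simp at hdvd; omega
        · apply hmem
          have hdN : i ∣ N := by rw [hsz] at hdvd; exact_mod_cast hdvd
          have hiN : i ≤ N := Nat.le_of_dvd (by omega) hdN
          have hii : i * i ≤ N := by
            have : (i:Int) * i ≤ (N : Int) := hsz ▸ h
            exact_mod_cast this
          simp only [pvSmall, pvDivs, Finset.mem_filter, Finset.mem_Icc]
          exact ⟨⟨⟨h0, hiN⟩, hdN⟩, hii⟩
      rw [if_neg hnd, if_neg hmem, zero_add]
  | case2 i db h =>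
    have hempty : (pvSmall N).filter (fun d => i ≤ d) = ∅ := by
      apply Finset.filter_false_of_mem
      intro d hd hle
      simp only [pvSmall, pvDivs, Finset.mem_filter, Finset.mem_Icc] at hd
      apply h
      have : (d : Int) * d ≤ (N : Int) := by exact_mod_cast hd.2
      have hmono : (i : Int) * i ≤ (d : Int) * d := by
        have : (i : Int) ≤ d := by exact_mod_cast hle
        nlinarith [Int.natCast_nonneg i, Int.natCast_nonneg d]
      rw [hsz]; omega
    rw [hempty]; simp

lemma pvSmall_sum (N : Nat) (hN : 1 ≤ N) :
    ∑ d ∈ pvSmall N, pvW N d = ((pvDivs N).card : Int) := by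
  have hcard : (pvLarge N).card = (pvSmall N).card := by
    apply Finset.card_nbij' (i := fun d => N / d) (j := fun d => N / d)
    · intro d hd
      rw [Finset.mem_coe] at hd
      show _ ∈ _; rw [Finset.mem_coe]
      simp only [pvLarge, pvSmall, pvDivs, Finset.mem_filter, Finset.mem_Icc] at hd ⊢
      obtain ⟨⟨⟨hd1, hdN⟩, hdvd⟩, hbig⟩ := hd
      obtain ⟨k, hk⟩ := hdvd
      have hk1 : 1 ≤ k := by
        rcases Nat.eq_zero_or_pos k with h0 | h0
        · subst h0; simp at hk; omega
        · exact h0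
      have hkd : k ≤ d := by nlinarith
      have hkey : N / d = k := by rw [hk]; exact Nat.mul_div_cancel_left k (by omega)
      rw [hkey]
      exact ⟨⟨⟨hk1, by nlinarith⟩, ⟨d, by rw [hk, Nat.mul_comm]⟩⟩, by nlinarith⟩
    · intro d hd
      rw [Finset.mem_coe] at hd
      show _ ∈ _; rw [Finset.mem_coe]
      simp only [pvLarge, pvSmall, pvDivs, Finset.mem_filter, Finset.mem_Icc] at hd ⊢
      obtain ⟨⟨⟨hd1, hdN⟩, hdvd⟩, hsmall⟩ := hd
      obtain ⟨k, hk⟩ := hdvd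
      have hk1 : 1 ≤ k := by
        rcases Nat.eq_zero_or_pos k with h0 | h0
        · subst h0; simp at hk; omega
        · exact h0
      have hdk : d ≤ k := by nlinarith
      have hkey : N / d = k := by rw [hk]; exact Nat.mul_div_cancel_left k (by omega)
      rw [hkey]
      exact ⟨⟨⟨hk1, by nlinarith⟩, ⟨d, by rw [hk, Nat.mul_comm]⟩⟩, by nlinarith⟩
    · intro d hd
      rw [Finset.mem_coe] at hd
      simp only [pvLarge, pvDivs, Finset.mem_filter, Finset.mem_Icc] at hd
      exact Nat.div_div_self hd.1.2 (by omega)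
    · intro d hd
      rw [Finset.mem_coe] at hd
      simp only [pvSmall, pvDivs, Finset.mem_filter, Finset.mem_Icc] at hd
      exact Nat.div_div_self hd.1.2 (by omega)
  have hunion : pvSmall N ∪ pvLarge N = pvDivs N := by
    ext d
    simp only [pvSmall, pvLarge, Finset.mem_union, Finset.mem_filter]
    constructor
    · rintro (⟨h, _⟩ | ⟨h, _⟩) <;> exact h
    · intro h
      rcases Nat.le_total (d * d) N with hle | hle
      · exact Or.inl ⟨h, hle⟩
      · exact Or.inr ⟨h, hle⟩
  have hinter : pvSmall N ∩ pvLarge N = (pvSmall N).filter (fun d => d * d = N) := by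
    ext d
    simp only [pvSmall, pvLarge, Finset.mem_inter, Finset.mem_filter]
    constructor
    · rintro ⟨⟨h1, h2⟩, ⟨_, h3⟩⟩; exact ⟨⟨h1, h2⟩, by omega⟩
    · rintro ⟨⟨h1, h2⟩, h3⟩; exact ⟨⟨h1, h2⟩, ⟨h1, by omega⟩⟩
  have hI : ((pvSmall N).filter (fun d => d * d = N)).card ≤ (pvSmall N).card :=
    Finset.card_filter_le _ _
  have hkey := Finset.card_union_add_card_inter (pvSmall N) (pvLarge N)
  rw [hunion, hinter, hcard] at hkey
  have hsum : ∑ d ∈ pvSmall N, pvW N d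
      = 2 * ((pvSmall N).card : Int)
        - (((pvSmall N).filter (fun d => d * d = N)).card : Int) := by
    have : ∀ d ∈ pvSmall N, pvW N d = 2 - (if d * d = N then (1:Int) else 0) := by
      intro d _; rw [pvW]; split_ifs <;> norm_num
    rw [Finset.sum_congr rfl this, Finset.sum_sub_distrib, Finset.sum_const,
      Finset.sum_boole]
    ring
  rw [hsum]
  omega

-- ===== VERDICT (by name: the statement is the Claim_ definition above) =====
theorem feladat_1_spec : Claim_equal_feladat_1 := by
  intro szam _
  unfold Spec_feladat_1 feladat_1 feladat_1_alt
  by_cases hpos : 0 < szam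
  · have h1 : (1 : Int) ≤ szam := hpos
    rw [pvA_count szam h1, pvB_loop szam h1 1 0]
    have hfilter : (pvSmall szam.toNat).filter (fun d => 1 ≤ d) = pvSmall szam.toNat := by
      apply Finset.filter_true_of_mem
      intro d hd
      simp only [pvSmall, pvDivs, Finset.mem_filter, Finset.mem_Icc] at hd
      omega
    rw [hfilter, pvSmall_sum szam.toNat (by omega)]
    by_cases h4 : ((pvDivs szam.toNat).card : Int) = 4 <;> simp [h4]
  · rw [PySem.List.pyRange_one_eq_nil (by omega), feladat_1_altLoop,
      dif_neg (show ¬(((1:Nat) : Int) * ((1:Nat) : Int) ≤ szam) by push_cast; omega)]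
    simp
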